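-- pv_equiv track=rewrite | github.com/reemaka/adventofcode2024 | day13/soln.py | calc_btn_presses
-- ===== SOURCE A (Python) =====
-- def calc_btn_presses(a_x, a_y, b_x, b_y, prize_x, prize_y):
--     min_cost = None
--     for a_i in range(100):
--         for b_i in range(100):
--             loc_x = a_i * a_x + b_i * b_x
--             loc_y = a_i * a_y + b_i * b_y
--             if loc_x == prize_x and loc_y == prize_y:
--                 cost = 3 * a_i + b_i
--                 if not min_cost or cost < min_cost:
--                     min_cost = cost
--                 break
--             elif loc_x > prize_x or loc_y > prize_y:
--                 continue
--     return min_cost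
-- ===== SOURCE B (Python) =====
-- def _row_b(b_x, b_y, rx, ry):
--     # smallest b in [0, 100) with b*b_x == rx and b*b_y == ry, else None
--     if b_x == 0 and b_y == 0:
--         b = 0 if rx == 0 and ry == 0 else None
--     elif b_x != 0:
--         b = rx // b_x if rx % b_x == 0 and (rx // b_x) * b_y == ry else None
--     else:
--         b = ry // b_y if ry % b_y == 0 and (ry // b_y) * b_x == rx else None
--     return b if b is not None and 0 <= b < 100 else None
--
--
-- def calc_btn_presses(a_x, a_y, b_x, b_y, prize_x, prize_y):
--     best = None
--     for a_i in range(100):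
--         b_i = _row_b(b_x, b_y, prize_x - a_i * a_x, prize_y - a_i * a_y)
--         if b_i is not None:
--             cost = 3 * a_i + b_i
--             if best is None or cost < best:
--                 best = cost
--     return best
-- ===== Notes on version B (the rewrite author's own statement) =====
-- stated objective: faster
-- what changed: Replaces the 100x100 brute-force grid scan with a single 100-row loop that computes each row's unique B-press count directly by integer division, and drops the falsy-zero min-cost test ('not min_cost') so a found cost of 0 is kept.
-- intended difference: When the prize is (0,0) and some (a,b) with 1<=a<100, 0<=b<100 also lands on (0,0), A's 'if not min_cost' treats the already-recorded optimal cost 0 as unset and overwrites it, returning the positive cost of a redundant solution (e.g. 4 on (1,1,-1,-1,0,0)); B returns the true minimum 0, which is the intended minimal cost. — e.g. on calc_btn_presses(1, 1, -1, -1, 0, 0): A returns some 4, B returns some 0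
import Mathlib
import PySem

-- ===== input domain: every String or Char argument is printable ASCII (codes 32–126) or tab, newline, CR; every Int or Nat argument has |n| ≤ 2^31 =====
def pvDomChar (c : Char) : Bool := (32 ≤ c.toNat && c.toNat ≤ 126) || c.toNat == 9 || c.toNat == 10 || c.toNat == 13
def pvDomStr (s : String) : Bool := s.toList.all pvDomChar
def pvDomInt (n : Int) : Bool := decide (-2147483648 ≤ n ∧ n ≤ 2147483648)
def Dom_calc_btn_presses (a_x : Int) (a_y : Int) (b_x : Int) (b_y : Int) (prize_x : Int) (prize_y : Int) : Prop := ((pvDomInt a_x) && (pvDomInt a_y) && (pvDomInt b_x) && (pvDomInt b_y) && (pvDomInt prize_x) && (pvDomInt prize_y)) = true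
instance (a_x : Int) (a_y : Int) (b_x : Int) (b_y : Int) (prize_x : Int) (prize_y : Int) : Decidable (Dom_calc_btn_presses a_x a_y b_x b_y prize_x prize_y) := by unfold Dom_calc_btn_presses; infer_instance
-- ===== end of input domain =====

-- B replaces A's 100×100 grid scan by one 100-row loop solving each row's unique b by division
-- (constant-factor faster) and returns the true minimum cost 0 where A's falsy-zero test loses it.

-- ===== PORT A =====
-- inner 'for b_i in range(100)' loop with its break; m is min_cost
def pvAInner (a_x a_y b_x b_y prize_x prize_y a_i : Int) : List Int → Option Int → Option Int
  | [], m => m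
  | b_i :: rest, m =>
    let loc_x := a_i * a_x + b_i * b_x
    let loc_y := a_i * a_y + b_i * b_y
    if loc_x = prize_x ∧ loc_y = prize_y then
      -- 'if not min_cost or cost < min_cost: min_cost = cost' then break
      let cost := 3 * a_i + b_i
      match m with
      | none => some cost
      | some v => if v = 0 ∨ cost < v then some cost else some v
    else
      -- the 'elif … continue' branch and the implicit fall-through both just continue
      pvAInner a_x a_y b_x b_y prize_x prize_y a_i rest m

def calc_btn_presses (a_x : Int) (a_y : Int) (b_x : Int) (b_y : Int) (prize_x : Int) (prize_y : Int) : Option Int :=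
  (PySem.List.pyRange 0 100 1).foldl
    (fun m a_i => pvAInner a_x a_y b_x b_y prize_x prize_y a_i (PySem.List.pyRange 0 100 1) m) none

-- ===== PORT B =====
-- _row_b: smallest b in [0,100) with b*b_x == rx and b*b_y == ry, else none
def pvRowB (b_x b_y rx ry : Int) : Option Int :=
  let b? : Option Int :=
    if b_x = 0 ∧ b_y = 0 then
      if rx = 0 ∧ ry = 0 then some 0 else none
    else if b_x ≠ 0 then
      if PySem.Int.mod rx b_x = 0 ∧ PySem.Int.floordiv rx b_x * b_y = ry then
        some (PySem.Int.floordiv rx b_x)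
      else none
    else
      if PySem.Int.mod ry b_y = 0 ∧ PySem.Int.floordiv ry b_y * b_x = rx then
        some (PySem.Int.floordiv ry b_y)
      else none
  match b? with
  | some b => if 0 ≤ b ∧ b < 100 then some b else none
  | none => none

def calc_btn_presses_alt (a_x : Int) (a_y : Int) (b_x : Int) (b_y : Int) (prize_x : Int) (prize_y : Int) : Option Int :=
  (PySem.List.pyRange 0 100 1).foldl
    (fun best a_i =>
      match pvRowB b_x b_y (prize_x - a_i * a_x) (prize_y - a_i * a_y) with
      | some b_i =>
        let cost := 3 * a_i + b_i
        match best with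
        | none => some cost
        | some v => if cost < v then some cost else some v
      | none => best) none

-- ===== PRECONDITION & SPEC =====
-- When the prize is (0,0) and some (a,b) with 1 ≤ a < 100, 0 ≤ b < 100 also lands on (0,0),
-- A's 'if not min_cost' treats the recorded optimal cost 0 as unset and overwrites it, returning
-- the positive cost of a redundant solution; B returns the intended minimum 0.
def D_calc_btn_presses (a_x : Int) (a_y : Int) (b_x : Int) (b_y : Int) (prize_x : Int) (prize_y : Int) : Prop :=
  prize_x = 0 ∧ prize_y = 0 ∧
    ∃ a ∈ PySem.List.pyRange 1 100 1, ∃ b ∈ PySem.List.pyRange 0 100 1,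
      a * a_x + b * b_x = 0 ∧ a * a_y + b * b_y = 0
instance (a_x : Int) (a_y : Int) (b_x : Int) (b_y : Int) (prize_x : Int) (prize_y : Int) : Decidable (D_calc_btn_presses a_x a_y b_x b_y prize_x prize_y) := by unfold D_calc_btn_presses; infer_instance

def Spec_calc_btn_presses (a_x : Int) (a_y : Int) (b_x : Int) (b_y : Int) (prize_x : Int) (prize_y : Int) (out : Option Int) : Prop := ¬ D_calc_btn_presses a_x a_y b_x b_y prize_x prize_y → out = calc_btn_presses_alt a_x a_y b_x b_y prize_x prize_y
instance (a_x : Int) (a_y : Int) (b_x : Int) (b_y : Int) (prize_x : Int) (prize_y : Int) (out : Option Int) : Decidable (Spec_calc_btn_presses a_x a_y b_x b_y prize_x prize_y out) := by unfold Spec_calc_btn_presses; infer_instance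

def pvDiffWitness_calc_btn_presses : Int × Int × Int × Int × Int × Int := (1, 1, -1, -1, 0, 0)
def pvDiffWitnessOut_calc_btn_presses : (Option Int) × (Option Int) := (some 4, some 0)

-- ===== CLAIM (what is proved, stated in full; the proofs are below) =====
def Claim_unchanged_calc_btn_presses : Prop := ∀ (a_x : Int) (a_y : Int) (b_x : Int) (b_y : Int) (prize_x : Int) (prize_y : Int), Dom_calc_btn_presses a_x a_y b_x b_y prize_x prize_y → Spec_calc_btn_presses a_x a_y b_x b_y prize_x prize_y (calc_btn_presses a_x a_y b_x b_y prize_x prize_y)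
def Claim_changed_calc_btn_presses : Prop := Dom_calc_btn_presses (pvDiffWitness_calc_btn_presses.1) (pvDiffWitness_calc_btn_presses.2.1) (pvDiffWitness_calc_btn_presses.2.2.1) (pvDiffWitness_calc_btn_presses.2.2.2.1) (pvDiffWitness_calc_btn_presses.2.2.2.2.1) (pvDiffWitness_calc_btn_presses.2.2.2.2.2) ∧ D_calc_btn_presses (pvDiffWitness_calc_btn_presses.1) (pvDiffWitness_calc_btn_presses.2.1) (pvDiffWitness_calc_btn_presses.2.2.1) (pvDiffWitness_calc_btn_presses.2.2.2.1) (pvDiffWitness_calc_btn_presses.2.2.2.2.1) (pvDiffWitness_calc_btn_presses.2.2.2.2.2) ∧ calc_btn_presses (pvDiffWitness_calc_btn_presses.1) (pvDiffWitness_calc_btn_presses.2.1) (pvDiffWitness_calc_btn_presses.2.2.1) (pvDiffWitness_calc_btn_presses.2.2.2.1) (pvDiffWitness_calc_btn_presses.2.2.2.2.1) (pvDiffWitness_calc_btn_presses.2.2.2.2.2) = pvDiffWitnessOut_calc_btn_presses.1 ∧ calc_btn_presses_alt (pvDiffWitness_calc_btn_presses.1) (pvDiffWitness_calc_btn_presses.2.1)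 (pvDiffWitness_calc_btn_presses.2.2.1) (pvDiffWitness_calc_btn_presses.2.2.2.1) (pvDiffWitness_calc_btn_presses.2.2.2.2.1) (pvDiffWitness_calc_btn_presses.2.2.2.2.2) = pvDiffWitnessOut_calc_btn_presses.2 ∧ pvDiffWitnessOut_calc_btn_presses.1 ≠ pvDiffWitnessOut_calc_btn_presses.2
def Claim_exact_calc_btn_presses : Prop := ∀ (a_x : Int) (a_y : Int) (b_x : Int) (b_y : Int) (prize_x : Int) (prize_y : Int), Dom_calc_btn_presses a_x a_y b_x b_y prize_x prize_y → D_calc_btn_presses a_x a_y b_x b_y prize_x prize_y → calc_btn_presses a_x a_y b_x b_y prize_x prize_y ≠ calc_btn_presses_alt a_x a_y b_x b_y prize_x prize_y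

-- ===== LEMMAS AND PROOFS =====

-- A's update of min_cost, including the falsy-zero test
def pvUpdA (m : Option Int) (c : Int) : Option Int :=
  match m with
  | none => some c
  | some v => if v = 0 ∨ c < v then some c else some v

-- A's whole outer-loop body as a fold step
def pvStepA (a_x a_y b_x b_y prize_x prize_y : Int) (m : Option Int) (a_i : Int) : Option Int :=
  match pvRowB b_x b_y (prize_x - a_i * a_x) (prize_y - a_i * a_y) with
  | some b => pvUpdA m (3 * a_i + b)
  | none => m

-- B's fold step (literally the lambda in calc_btn_presses_alt)
def pvStepB (a_x a_y b_x b_y prize_x prize_y : Int) (best : Option Int) (a_i : Int) : Option Int :=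
  match pvRowB b_x b_y (prize_x - a_i * a_x) (prize_y - a_i * a_y) with
  | some b_i =>
    let cost := 3 * a_i + b_i
    match best with
    | none => some cost
    | some v => if cost < v then some cost else some v
  | none => best

theorem alt_eq_fold (a_x a_y b_x b_y prize_x prize_y : Int) :
    calc_btn_presses_alt a_x a_y b_x b_y prize_x prize_y =
      (PySem.List.pyRange 0 100 1).foldl (pvStepB a_x a_y b_x b_y prize_x prize_y) none := rfl

-- a list's find? when the predicate characterises a unique value
theorem find?_unique (p : Int → Bool) (q : Int) (hp : ∀ b, p b = true ↔ b = q) :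
    ∀ l : List Int, l.find? p = if q ∈ l then some q else none := by
  intro l
  induction l with
  | nil => simp
  | cons a l ih =>
    rw [List.find?_cons]
    by_cases ha : a = q
    · subst ha
      rw [(hp a).mpr rfl]
      simp
    · have hpa : p a = false := by
        cases h : p a
        · rfl
        · exact absurd ((hp a).mp h) ha
      have hqa : ¬q = a := fun h => ha h.symm
      rw [hpa, ih]
      simp [List.mem_cons, hqa]

theorem find?_unique_range (p : Int → Bool) (q : Int) (hp : ∀ b, p b = true ↔ b = q) :
    (PySem.List.pyRange 0 100 1).find? p = if 0 ≤ q ∧ q < 100 then some q else none := by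
  rw [find?_unique p q hp]
  by_cases hq : 0 ≤ q ∧ q < 100
  · rw [if_pos (PySem.List.mem_pyRange_one.mpr hq), if_pos hq]
  · rw [if_neg (fun hmem => hq (PySem.List.mem_pyRange_one.mp hmem)), if_neg hq]

-- exact division facts for pvRowB
theorem floordiv_exact (a b : Int) (h : PySem.Int.mod a b = 0) :
    PySem.Int.floordiv a b * b = a := by
  have := PySem.Int.floordiv_mul_add_mod a b
  omega

theorem floordiv_zero_left (b : Int) (hb : b ≠ 0) : PySem.Int.floordiv 0 b = 0 := by
  have h0 : PySem.Int.mod 0 b = 0 := (PySem.Int.mod_eq_zero_iff_dvd 0 b).mpr (dvd_zero b)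
  have := floordiv_exact 0 b h0
  rcases mul_eq_zero.mp this with h | h
  · exact h
  · exact absurd h hb

-- pvRowB is exactly A's inner search: the first b in [0,100) hitting (rx, ry)
theorem find?_eq_rowB (b_x b_y rx ry : Int) :
    (PySem.List.pyRange 0 100 1).find? (fun b => decide (b * b_x = rx ∧ b * b_y = ry)) =
      pvRowB b_x b_y rx ry := by
  by_cases hbx : b_x = 0
  · subst hbx
    by_cases hby : b_y = 0
    · -- both zero: every b hits iff rx = ry = 0, and 0 is the first b
      subst hby
      by_cases hr : rx = 0 ∧ ry = 0
      · obtain ⟨h1, h2⟩ := hr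
        subst h1; subst h2
        have hr' : pvRowB 0 0 0 0 = some 0 := by simp [pvRowB]
        rw [hr', PySem.List.pyRange_one_cons (by norm_num), List.find?_cons]
        simp
      · have hr' : pvRowB 0 0 rx ry = none := by simp [pvRowB, hr]
        rw [hr']
        apply List.find?_eq_none.mpr
        intro b _
        simp only [decide_eq_true_eq, mul_zero]
        tauto
    · -- b_x = 0, b_y ≠ 0 : b is determined by ry // b_y, and rx must be 0
      by_cases hdvd : PySem.Int.mod ry b_y = 0
      · have hq : PySem.Int.floordiv ry b_y * b_y = ry := floordiv_exact ry b_y hdvd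
        by_cases hrx : rx = 0
        · subst hrx
          have hr' : pvRowB 0 b_y 0 ry =
              if 0 ≤ PySem.Int.floordiv ry b_y ∧ PySem.Int.floordiv ry b_y < 100 then
                some (PySem.Int.floordiv ry b_y) else none := by
            simp [pvRowB, hby, hdvd]
          have hp : ∀ b : Int, (decide (b * (0:Int) = 0 ∧ b * b_y = ry)) = true ↔
              b = PySem.Int.floordiv ry b_y := by
            intro b
            simp only [decide_eq_true_eq, mul_zero, true_and]
            constructor
            · intro h2
              exact mul_right_cancel₀ hby (by rw [hq, h2])
            · rintro rfl
              exact hq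
          rw [hr', find?_unique_range _ _ hp]
        · have hr' : pvRowB 0 b_y rx ry = none := by
            have : ¬((0:Int) = rx) := fun h => hrx h.symm
            simp [pvRowB, hby, this]
          rw [hr']
          apply List.find?_eq_none.mpr
          intro b _
          simp only [decide_eq_true_eq, mul_zero]
          rintro ⟨h1, _⟩
          exact hrx h1.symm
      · have hr' : pvRowB 0 b_y rx ry = none := by simp [pvRowB, hby, hdvd]
        rw [hr']
        apply List.find?_eq_none.mpr
        intro b _
        simp only [decide_eq_true_eq, mul_zero]
        rintro ⟨_, h2⟩
        exact hdvd ((PySem.Int.mod_eq_zero_iff_dvd ry b_y).mpr ⟨b, by rw [← h2]; ring⟩)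
  · -- b_x ≠ 0 : b is determined by rx // b_x
    have hnand : ¬(b_x = 0 ∧ b_y = 0) := fun h => hbx h.1
    by_cases hdvd : PySem.Int.mod rx b_x = 0
    · have hq : PySem.Int.floordiv rx b_x * b_x = rx := floordiv_exact rx b_x hdvd
      by_cases hry : PySem.Int.floordiv rx b_x * b_y = ry
      · have hr' : pvRowB b_x b_y rx ry =
            if 0 ≤ PySem.Int.floordiv rx b_x ∧ PySem.Int.floordiv rx b_x < 100 then
              some (PySem.Int.floordiv rx b_x) else none := by
          simp [pvRowB, hbx, hdvd, hry]
        have hp : ∀ b : Int, (decide (b * b_x = rx ∧ b * b_y = ry)) = true ↔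
            b = PySem.Int.floordiv rx b_x := by
          intro b
          simp only [decide_eq_true_eq]
          constructor
          · rintro ⟨h1, _⟩
            exact mul_right_cancel₀ hbx (by rw [hq, h1])
          · rintro rfl
            exact ⟨hq, hry⟩
        rw [hr', find?_unique_range _ _ hp]
      · have hr' : pvRowB b_x b_y rx ry = none := by simp [pvRowB, hbx, hry]
        rw [hr']
        apply List.find?_eq_none.mpr
        intro b _
        simp only [decide_eq_true_eq]
        rintro ⟨h1, h2⟩
        have hb : b = PySem.Int.floordiv rx b_x := mul_right_cancel₀ hbx (by rw [hq, h1])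
        exact hry (by rw [← hb]; exact h2)
    · have hr' : pvRowB b_x b_y rx ry = none := by simp [pvRowB, hbx, hdvd]
      rw [hr']
      apply List.find?_eq_none.mpr
      intro b _
      simp only [decide_eq_true_eq]
      rintro ⟨h1, _⟩
      exact hdvd ((PySem.Int.mod_eq_zero_iff_dvd rx b_x).mpr ⟨b, by rw [← h1]; ring⟩)

-- A's inner loop is find?-then-update
theorem inner_eq_find? (a_x a_y b_x b_y prize_x prize_y a_i : Int) :
    ∀ (bs : List Int) (m : Option Int),
      pvAInner a_x a_y b_x b_y prize_x prize_y a_i bs m =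
        match bs.find? (fun b => decide (a_i * a_x + b * b_x = prize_x ∧ a_i * a_y + b * b_y = prize_y)) with
        | some b => pvUpdA m (3 * a_i + b)
        | none => m := by
  intro bs
  induction bs with
  | nil => intro m; rfl
  | cons b rest ih =>
    intro m
    rw [List.find?_cons]
    by_cases h : a_i * a_x + b * b_x = prize_x ∧ a_i * a_y + b * b_y = prize_y
    · simp only [pvAInner, if_pos h, decide_eq_true h]
      rfl
    · simp only [pvAInner, if_neg h, decide_eq_false h, ih]

-- A's outer-loop body equals pvStepA
theorem inner_eq_stepA (a_x a_y b_x b_y prize_x prize_y a_i : Int) (m : Option Int) :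
    pvAInner a_x a_y b_x b_y prize_x prize_y a_i (PySem.List.pyRange 0 100 1) m =
      pvStepA a_x a_y b_x b_y prize_x prize_y m a_i := by
  rw [inner_eq_find?]
  have hpred : (fun b => decide (a_i * a_x + b * b_x = prize_x ∧ a_i * a_y + b * b_y = prize_y)) =
      (fun b => decide (b * b_x = prize_x - a_i * a_x ∧ b * b_y = prize_y - a_i * a_y)) := by
    funext b
    apply decide_eq_decide.mpr
    constructor
    · rintro ⟨h1, h2⟩; exact ⟨by linarith, by linarith⟩
    · rintro ⟨h1, h2⟩; exact ⟨by linarith, by linarith⟩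
  rw [hpred, find?_eq_rowB]
  rfl

theorem calc_eq_fold (a_x a_y b_x b_y prize_x prize_y : Int) :
    calc_btn_presses a_x a_y b_x b_y prize_x prize_y =
      (PySem.List.pyRange 0 100 1).foldl (pvStepA a_x a_y b_x b_y prize_x prize_y) none := by
  have h : (fun m a_i => pvAInner a_x a_y b_x b_y prize_x prize_y a_i (PySem.List.pyRange 0 100 1) m) =
      pvStepA a_x a_y b_x b_y prize_x prize_y := by
    funext m a_i
    exact inner_eq_stepA a_x a_y b_x b_y prize_x prize_y a_i m
  rw [calc_btn_presses, h]

-- what a successful pvRowB guarantees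
theorem rowB_spec (b_x b_y rx ry b : Int) (h : pvRowB b_x b_y rx ry = some b) :
    0 ≤ b ∧ b < 100 ∧ b * b_x = rx ∧ b * b_y = ry := by
  have hfind := find?_eq_rowB b_x b_y rx ry
  rw [h] at hfind
  have hmem := List.mem_of_find?_eq_some hfind
  have hp := List.find?_some hfind
  rw [PySem.List.mem_pyRange_one] at hmem
  simp only [decide_eq_true_eq] at hp
  exact ⟨hmem.1, hmem.2, hp.1, hp.2⟩

-- if some b in [0,100) hits, pvRowB finds one
theorem rowB_exists (b_x b_y rx ry b : Int) (hb0 : 0 ≤ b) (hb1 : b < 100)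
    (h1 : b * b_x = rx) (h2 : b * b_y = ry) : ∃ b0, pvRowB b_x b_y rx ry = some b0 := by
  cases h : pvRowB b_x b_y rx ry with
  | some b0 => exact ⟨b0, rfl⟩
  | none =>
    exfalso
    have hfind := find?_eq_rowB b_x b_y rx ry
    rw [h] at hfind
    have := List.find?_eq_none.mp hfind b (PySem.List.mem_pyRange_one.mpr ⟨hb0, hb1⟩)
    simp only [decide_eq_true_eq] at this
    exact this ⟨h1, h2⟩

theorem rowB_zero (b_x b_y : Int) : pvRowB b_x b_y 0 0 = some 0 := by
  by_cases hbx : b_x = 0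
  · by_cases hby : b_y = 0
    · simp [pvRowB, hbx, hby]
    · have hd : PySem.Int.mod (0:Int) b_y = 0 := (PySem.Int.mod_eq_zero_iff_dvd 0 b_y).mpr (dvd_zero b_y)
      have hq := floordiv_zero_left b_y hby
      simp [pvRowB, hbx, hby, hd, hq]
  · have hd : PySem.Int.mod (0:Int) b_x = 0 := (PySem.Int.mod_eq_zero_iff_dvd 0 b_x).mpr (dvd_zero b_x)
    have hq := floordiv_zero_left b_x hbx
    simp [pvRowB, hbx, hd, hq]

-- fold stays put while every row misses
theorem foldl_fix (f : Option Int → Int → Option Int) :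
    ∀ (l : List Int) (m : Option Int), (∀ a ∈ l, ∀ m', f m' a = m') → l.foldl f m = m := by
  intro l
  induction l with
  | nil => intro m _; rfl
  | cons a l ih =>
    intro m h
    rw [List.foldl_cons, h a (by simp)]
    exact ih m (fun a' ha' m' => h a' (by simp [ha']) m')

-- off the (0,0)-prize corner, the falsy-zero test never fires and the two folds agree
theorem foldl_stepA_eq_stepB (a_x a_y b_x b_y prize_x prize_y : Int)
    (hp : ¬(prize_x = 0 ∧ prize_y = 0)) :
    ∀ (l : List Int), (∀ a ∈ l, 0 ≤ a) →
      ∀ (m : Option Int), (m = none ∨ ∃ c, m = some c ∧ 0 < c) →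
        l.foldl (pvStepA a_x a_y b_x b_y prize_x prize_y) m =
          l.foldl (pvStepB a_x a_y b_x b_y prize_x prize_y) m := by
  intro l
  induction l with
  | nil => intro _ m _; rfl
  | cons a l ih =>
    intro hnn m hm
    have ha : 0 ≤ a := hnn a (by simp)
    rw [List.foldl_cons, List.foldl_cons]
    cases hrow : pvRowB b_x b_y (prize_x - a * a_x) (prize_y - a * a_y) with
    | none =>
      rw [show pvStepA a_x a_y b_x b_y prize_x prize_y m a = m by simp [pvStepA, hrow],
        show pvStepB a_x a_y b_x b_y prize_x prize_y m a = m by simp [pvStepB, hrow]]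
      exact ih (fun a' ha' => hnn a' (by simp [ha'])) m hm
    | some b =>
      obtain ⟨hb0, _, hx, hy⟩ := rowB_spec _ _ _ _ _ hrow
      have hcpos : 0 < 3 * a + b := by
        rcases lt_or_eq_of_le (by omega : (0:Int) ≤ 3 * a + b) with h | h
        · exact h
        · exfalso
          have ha0 : a = 0 := by omega
          have hb0' : b = 0 := by omega
          apply hp
          rw [ha0] at hx hy
          rw [hb0'] at hx hy
          constructor
          · linarith [hx]
          · linarith [hy]
      have hstep : pvStepA a_x a_y b_x b_y prize_x prize_y m a =
          pvStepB a_x a_y b_x b_y prize_x prize_y m a := by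
        rcases hm with rfl | ⟨c, rfl, hc⟩
        · simp [pvStepA, pvStepB, pvUpdA, hrow]
        · simp only [pvStepA, pvStepB, pvUpdA, hrow]
          simp [show c ≠ 0 by omega]
      rw [hstep]
      apply ih (fun a' ha' => hnn a' (by simp [ha']))
      right
      rcases hm with rfl | ⟨c, rfl, hc⟩
      · exact ⟨3 * a + b, by simp [pvStepB, hrow], hcpos⟩
      · simp only [pvStepB, hrow]
        by_cases hlt : 3 * a + b < c
        · exact ⟨3 * a + b, by simp [hlt], hcpos⟩
        · exact ⟨c, by simp [hlt], hc⟩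

-- B's fold keeps a recorded 0 once rows are nonnegative
theorem foldl_stepB_some_zero (a_x a_y b_x b_y prize_x prize_y : Int) :
    ∀ (l : List Int), (∀ a ∈ l, 0 ≤ a) →
      l.foldl (pvStepB a_x a_y b_x b_y prize_x prize_y) (some 0) = some 0 := by
  intro l
  induction l with
  | nil => intro _; rfl
  | cons a l ih =>
    intro hnn
    have ha : 0 ≤ a := hnn a (by simp)
    rw [List.foldl_cons]
    have hstep : pvStepB a_x a_y b_x b_y prize_x prize_y (some 0) a = some 0 := by
      cases hrow : pvRowB b_x b_y (prize_x - a * a_x) (prize_y - a * a_y) with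
      | none => simp [pvStepB, hrow]
      | some b =>
        obtain ⟨hb0, _, _, _⟩ := rowB_spec _ _ _ _ _ hrow
        simp [pvStepB, hrow, show ¬(3 * a + b < 0) by omega]
    rw [hstep]
    exact ih (fun a' ha' => hnn a' (by simp [ha']))

-- invariant for A's fold on rows a ≥ 1: min_cost is some 0 or some positive
theorem stepA_inv (a_x a_y b_x b_y prize_x prize_y a : Int) (ha : 1 ≤ a) (m : Option Int)
    (hm : m = some 0 ∨ ∃ c, m = some c ∧ 0 < c) :
    pvStepA a_x a_y b_x b_y prize_x prize_y m a = some 0 ∨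
      ∃ c, pvStepA a_x a_y b_x b_y prize_x prize_y m a = some c ∧ 0 < c := by
  cases hrow : pvRowB b_x b_y (prize_x - a * a_x) (prize_y - a * a_y) with
  | none => simpa [pvStepA, hrow] using hm
  | some b =>
    obtain ⟨hb0, _, _, _⟩ := rowB_spec _ _ _ _ _ hrow
    have hcpos : 0 < 3 * a + b := by omega
    rcases hm with rfl | ⟨c, rfl, hc⟩
    · exact Or.inr ⟨3 * a + b, by simp [pvStepA, pvUpdA, hrow], hcpos⟩
    · simp only [pvStepA, pvUpdA, hrow]
      by_cases hif : c = 0 ∨ 3 * a + b < c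
      · exact Or.inr ⟨3 * a + b, by simp [hif], hcpos⟩
      · exact Or.inr ⟨c, by simp [hif], hc⟩

theorem stepA_pos (a_x a_y b_x b_y prize_x prize_y a : Int) (ha : 1 ≤ a) (m : Option Int)
    (hm : ∃ c, m = some c ∧ 0 < c) :
    ∃ c, pvStepA a_x a_y b_x b_y prize_x prize_y m a = some c ∧ 0 < c := by
  obtain ⟨c, rfl, hc⟩ := hm
  cases hrow : pvRowB b_x b_y (prize_x - a * a_x) (prize_y - a * a_y) with
  | none => exact ⟨c, by simp [pvStepA, hrow], hc⟩
  | some b =>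
    obtain ⟨hb0, _, _, _⟩ := rowB_spec _ _ _ _ _ hrow
    simp only [pvStepA, pvUpdA, hrow]
    by_cases hif : c = 0 ∨ 3 * a + b < c
    · exact ⟨3 * a + b, by simp [hif], by omega⟩
    · exact ⟨c, by simp [hif], hc⟩

theorem foldl_stepA_inv (a_x a_y b_x b_y prize_x prize_y : Int) :
    ∀ (l : List Int), (∀ a ∈ l, 1 ≤ a) →
      ∀ (m : Option Int), (m = some 0 ∨ ∃ c, m = some c ∧ 0 < c) →
        (l.foldl (pvStepA a_x a_y b_x b_y prize_x prize_y) m = some 0 ∨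
          ∃ c, l.foldl (pvStepA a_x a_y b_x b_y prize_x prize_y) m = some c ∧ 0 < c) := by
  intro l
  induction l with
  | nil => intro _ m hm; simpa using hm
  | cons a l ih =>
    intro h1 m hm
    rw [List.foldl_cons]
    exact ih (fun a' ha' => h1 a' (by simp [ha']))
      _ (stepA_inv a_x a_y b_x b_y prize_x prize_y a (h1 a (by simp)) m hm)

theorem foldl_stepA_pos (a_x a_y b_x b_y prize_x prize_y : Int) :
    ∀ (l : List Int), (∀ a ∈ l, 1 ≤ a) →
      ∀ (m : Option Int), (∃ c, m = some c ∧ 0 < c) →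
        ∃ c, l.foldl (pvStepA a_x a_y b_x b_y prize_x prize_y) m = some c ∧ 0 < c := by
  intro l
  induction l with
  | nil => intro _ m hm; simpa using hm
  | cons a l ih =>
    intro h1 m hm
    rw [List.foldl_cons]
    exact ih (fun a' ha' => h1 a' (by simp [ha']))
      _ (stepA_pos a_x a_y b_x b_y prize_x prize_y a (h1 a (by simp)) m hm)

-- at row 0 with prize (0,0), both steps record cost 0
theorem stepA_zero (a_x a_y b_x b_y : Int) :
    pvStepA a_x a_y b_x b_y 0 0 none 0 = some 0 := by
  simp [pvStepA, pvUpdA, rowB_zero]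

theorem stepB_zero (a_x a_y b_x b_y : Int) :
    pvStepB a_x a_y b_x b_y 0 0 none 0 = some 0 := by
  simp [pvStepB, rowB_zero]

theorem mem_tail_range (a : Int) (ha : a ∈ PySem.List.pyRange 1 100 1) : 1 ≤ a ∧ a < 100 :=
  PySem.List.mem_pyRange_one.mp ha

theorem range_split : PySem.List.pyRange 0 100 1 = 0 :: PySem.List.pyRange 1 100 1 :=
  PySem.List.pyRange_one_cons (by norm_num)

-- ===== VERDICT (by name: the statements are the Claim_ definitions above) =====
theorem calc_btn_presses_spec : Claim_unchanged_calc_btn_presses := by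
  intro a_x a_y b_x b_y prize_x prize_y _ hnD
  rw [calc_eq_fold, alt_eq_fold]
  by_cases hp : prize_x = 0 ∧ prize_y = 0
  · -- prize (0,0); ¬D_ means no row a ≥ 1 hits, so both results stay at the recorded 0
    obtain ⟨hpx, hpy⟩ := hp
    have hnone : ∀ a ∈ PySem.List.pyRange 1 100 1,
        pvRowB b_x b_y (prize_x - a * a_x) (prize_y - a * a_y) = none := by
      intro a ha
      obtain ⟨ha1, ha2⟩ := mem_tail_range a ha
      cases hrow : pvRowB b_x b_y (prize_x - a * a_x) (prize_y - a * a_y) with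
      | none => rfl
      | some b =>
        exfalso
        obtain ⟨hb0, hb1, hx, hy⟩ := rowB_spec _ _ _ _ _ hrow
        exact hnD ⟨hpx, hpy, a, PySem.List.mem_pyRange_one.mpr ⟨ha1, ha2⟩,
          b, PySem.List.mem_pyRange_one.mpr ⟨hb0, hb1⟩, by rw [hpx] at hx; linarith,
          by rw [hpy] at hy; linarith⟩
    rw [range_split, List.foldl_cons, List.foldl_cons]
    subst hpx; subst hpy
    rw [stepA_zero, stepB_zero]
    rw [foldl_fix _ _ _ (fun a ha m' => by simp only [pvStepA, hnone a ha]),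
      foldl_fix _ _ _ (fun a ha m' => by simp only [pvStepB, hnone a ha])]
  · -- prize ≠ (0,0): the falsy-zero test never fires, the folds agree step by step
    exact foldl_stepA_eq_stepB a_x a_y b_x b_y prize_x prize_y hp _
      (fun a ha => (PySem.List.mem_pyRange_one.mp ha).1) none (Or.inl rfl)

set_option maxRecDepth 100000 in
theorem calc_btn_presses_changed : Claim_changed_calc_btn_presses := by unfold Claim_changed_calc_btn_presses; decide

theorem calc_btn_presses_tight : Claim_exact_calc_btn_presses := by
  intro a_x a_y b_x b_y prize_x prize_y _ hD
  obtain ⟨hpx, hpy, a, ha, b, hb, hx, hy⟩ := hD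
  obtain ⟨ha1, ha2⟩ := mem_tail_range a ha
  obtain ⟨hb1, hb2⟩ := PySem.List.mem_pyRange_one.mp hb
  rw [calc_eq_fold, alt_eq_fold, range_split, List.foldl_cons, List.foldl_cons]
  subst hpx; subst hpy
  rw [stepA_zero, stepB_zero]
  rw [foldl_stepB_some_zero a_x a_y b_x b_y 0 0 _
    (fun a' ha' => by have := mem_tail_range a' ha'; omega)]
  -- A's fold over rows 1..99 passes the witness row and ends positive
  obtain ⟨s, t, hst⟩ := List.append_of_mem ha
  rw [hst]
  have hsub : ∀ a' ∈ s, 1 ≤ a' := by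
    intro a' ha'; exact (mem_tail_range a' (by rw [hst]; simp [ha'])).1
  have htub : ∀ a' ∈ t, 1 ≤ a' := by
    intro a' ha'; exact (mem_tail_range a' (by rw [hst]; simp [ha'])).1
  rw [List.foldl_append, List.foldl_cons]
  have hinv := foldl_stepA_inv a_x a_y b_x b_y 0 0 s hsub (some 0) (Or.inl rfl)
  set m1 := s.foldl (pvStepA a_x a_y b_x b_y 0 0) (some 0) with hm1
  -- the witness row hits, so after it min_cost is positive
  obtain ⟨b0, hb0⟩ := rowB_exists b_x b_y (0 - a * a_x) (0 - a * a_y) b hb1 hb2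
    (by linarith) (by linarith)
  have hposstep : ∃ c, pvStepA a_x a_y b_x b_y 0 0 m1 a = some c ∧ 0 < c := by
    obtain ⟨hb00, _, _, _⟩ := rowB_spec _ _ _ _ _ hb0
    rcases hinv with h0 | hpos
    · rw [h0]
      exact ⟨3 * a + b0, by simp only [pvStepA, pvUpdA, hb0]; simp, by omega⟩
    · exact stepA_pos a_x a_y b_x b_y 0 0 a ha1 m1 hpos
  obtain ⟨c, hc, hcpos⟩ := foldl_stepA_pos a_x a_y b_x b_y 0 0 t htub _ hposstep
  rw [hc]
  intro hcontra
  have : c = 0 := by injection hcontra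
  omega
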